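-- pv_equiv track=rewrite | github.com/Sahil-Sewani/Seq-Analysis-Pipeline | calculate_from_pairs.py | calculation_set_b
-- ===== SOURCE A (Python) =====
-- def calculation_set_b(seq1, seq2):
--     num_of_align_sites = len(seq1)
--
--     # initialize counters
--     identical_count = 0
--     purine_transition_count = 0
--     pyrimidine_transition_count = 0
--     transversion_count = 0
--
--     # iterate through each position in the alignment
--     for i in range(num_of_align_sites):
--         if seq1[i] == seq2[i]:
--             # sequences are identical, increment identical count
--             identical_count += 1
--         elif (seq1[i] in "AG") and (seq2[i] in "AG"):  # purine transition
--             purine_transition_count += 1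
--         elif (seq1[i] in "CT") and (seq2[i] in "CT"):  # pyrimidine transition
--             pyrimidine_transition_count += 1
--         else:
--             # it must be a transversion, increment count
--             transversion_count += 1
--
--     return num_of_align_sites, identical_count, purine_transition_count, pyrimidine_transition_count, transversion_count
-- ===== SOURCE B (Python) =====
-- def calculation_set_b(seq1, seq2):
--     num_of_align_sites = len(seq1)
--     # materialize aligned pairs (explicit indexing keeps IndexError on short seq2)
--     pairs = [(seq1[i], seq2[i]) for i in range(num_of_align_sites)]
--     identical_count = sum(1 for c1, c2 in pairs if c1 == c2)
--     # a purine transition is exactly an (A,G) or (G,A) pair; pyrimidine exactly (C,T) or (T,C)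
--     purine_transition_count = pairs.count(('A', 'G')) + pairs.count(('G', 'A'))
--     pyrimidine_transition_count = pairs.count(('C', 'T')) + pairs.count(('T', 'C'))
--     # everything else is a transversion
--     transversion_count = num_of_align_sites - identical_count - purine_transition_count - pyrimidine_transition_count
--     return num_of_align_sites, identical_count, purine_transition_count, pyrimidine_transition_count, transversion_count
-- ===== Notes on version B (the rewrite author's own statement) =====
-- stated objective: alternative
-- what changed: B drops A's per-site if/elif chain entirely: it materializes the aligned pair list, counts identical pairs, obtains each transition count as a sum of two literal-pair counts ((A,G)+(G,A), (C,T)+(T,C)), and gets transversions by subtraction from the site count.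
import Mathlib
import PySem

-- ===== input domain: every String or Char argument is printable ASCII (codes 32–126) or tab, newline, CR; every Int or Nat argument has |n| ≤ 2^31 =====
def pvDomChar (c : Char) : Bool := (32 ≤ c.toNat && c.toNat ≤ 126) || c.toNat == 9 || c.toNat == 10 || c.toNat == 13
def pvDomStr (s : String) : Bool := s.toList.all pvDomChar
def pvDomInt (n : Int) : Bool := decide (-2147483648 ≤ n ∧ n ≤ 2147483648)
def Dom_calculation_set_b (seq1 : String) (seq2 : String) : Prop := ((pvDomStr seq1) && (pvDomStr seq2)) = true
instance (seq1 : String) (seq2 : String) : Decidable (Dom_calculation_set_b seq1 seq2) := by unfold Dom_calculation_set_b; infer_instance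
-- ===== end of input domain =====

-- B replaces A's per-site if/elif chain with literal-pair counting: build the aligned pair list,
-- count identical pairs, count the four transition pairs (A,G),(G,A),(C,T),(T,C) directly, and
-- obtain transversions by subtraction; alternative decomposition, not faster.

-- ===== PORT A =====
-- A's loop body: classify one aligned pair of characters, bumping one of the four counters by 1.
-- 'c in "AG"' (single-character membership) is ported exactly as membership in "AG".toList.
def pvStepA (acc : Int × Int × Int × Int) (x : Char × Char) : Int × Int × Int × Int :=
  if x.1 == x.2 then (acc.1 + 1, acc.2.1, acc.2.2.1, acc.2.2.2)
  else if "AG".toList.contains x.1 && "AG".toList.contains x.2 then (acc.1, acc.2.1 + 1, acc.2.2.1, acc.2.2.2)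
  else if "CT".toList.contains x.1 && "CT".toList.contains x.2 then (acc.1, acc.2.1, acc.2.2.1 + 1, acc.2.2.2)
  else (acc.1, acc.2.1, acc.2.2.1, acc.2.2.2 + 1)

def calculation_set_b (seq1 : String) (seq2 : String) : Int × Int × Int × Int × Int :=
  let num : Int := PySem.Str.len seq1
  let r := (PySem.List.pyRange 0 num 1).foldl
    (fun (acc : Int × Int × Int × Int) i =>
      match PySem.Str.pyGet? seq1 i, PySem.Str.pyGet? seq2 i with
      | some c1, some c2 => pvStepA acc (c1, c2)
      | _, _ => acc)   -- seq2[i] out of range: Python raises IndexError; excluded by Pre_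
    (0, 0, 0, 0)
  (num, r.1, r.2.1, r.2.2.1, r.2.2.2)

-- ===== PORT B =====
def calculation_set_b_alt (seq1 : String) (seq2 : String) : Int × Int × Int × Int × Int :=
  let num : Int := PySem.Str.len seq1
  -- pairs = [(seq1[i], seq2[i]) for i in range(num_of_align_sites)]
  let pairs := (PySem.List.pyRange 0 num 1).foldl
    (fun (acc : List (Char × Char)) i =>
      match PySem.Str.pyGet? seq1 i with
      | some c1 =>
        match PySem.Str.pyGet? seq2 i with
        | some c2 => acc ++ [(c1, c2)]
        | none => acc   -- seq2[i] out of range: Python raises IndexError; excluded by Pre_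
      | none => acc)
    []
  -- identical_count = sum(1 for c1, c2 in pairs if c1 == c2)
  let identical := pairs.foldl (fun (s : Int) p => if p.1 == p.2 then s + 1 else s) 0
  -- transition counts from the four literal pairs
  let purine : Int := (PySem.List.count pairs ('A', 'G') : Int) + (PySem.List.count pairs ('G', 'A') : Int)
  let pyrimidine : Int := (PySem.List.count pairs ('C', 'T') : Int) + (PySem.List.count pairs ('T', 'C') : Int)
  -- transversion_count by subtraction
  (num, identical, purine, pyrimidine, num - identical - purine - pyrimidine)

-- ===== PRECONDITION & SPEC =====
-- Pre_ excludes exactly the inputs where seq2 is shorter than seq1: there both A and B raise IndexError.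
def Pre_calculation_set_b (seq1 : String) (seq2 : String) : Prop :=
  seq1.toList.length ≤ seq2.toList.length
instance (seq1 : String) (seq2 : String) : Decidable (Pre_calculation_set_b seq1 seq2) := by
  unfold Pre_calculation_set_b; infer_instance

def pvWitness_calculation_set_b : String × String := ("ACGT", "AGTTC")

def Spec_calculation_set_b (seq1 : String) (seq2 : String) (out : Int × Int × Int × Int × Int) : Prop :=
  out = calculation_set_b_alt seq1 seq2
instance (seq1 : String) (seq2 : String) (out : Int × Int × Int × Int × Int) : Decidable (Spec_calculation_set_b seq1 seq2 out) := by
  unfold Spec_calculation_set_b; infer_instance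

-- ===== CLAIM (what is proved, stated in full; the proofs are below) =====
def Claim_equal_calculation_set_b : Prop := ∀ (seq1 : String) (seq2 : String), Dom_calculation_set_b seq1 seq2 → Pre_calculation_set_b seq1 seq2 → Spec_calculation_set_b seq1 seq2 (calculation_set_b seq1 seq2)

-- ===== LEMMAS AND PROOFS =====

-- the four mutually exclusive classification predicates, exactly as A's if/elif chain tests them
def pvId (x : Char × Char) : Bool := x.1 == x.2
def pvPur (x : Char × Char) : Bool :=
  !(x.1 == x.2) && ("AG".toList.contains x.1 && "AG".toList.contains x.2)
def pvPyr (x : Char × Char) : Bool :=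
  !(x.1 == x.2) && !("AG".toList.contains x.1 && "AG".toList.contains x.2)
    && ("CT".toList.contains x.1 && "CT".toList.contains x.2)
def pvTv (x : Char × Char) : Bool :=
  !(x.1 == x.2) && !("AG".toList.contains x.1 && "AG".toList.contains x.2)
    && !("CT".toList.contains x.1 && "CT".toList.contains x.2)

-- Under Pre_, an index loop reading seq1[i], seq2[i] for i in range(len(seq1)) is a fold over the zip.
theorem pv_loop_zip {σ : Type} (seq1 seq2 : String)
    (h : seq1.toList.length ≤ seq2.toList.length) (g : σ → Char × Char → σ) (init : σ) :
    (PySem.List.pyRange 0 (PySem.Str.len seq1) 1).foldl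
      (fun acc i =>
        match PySem.Str.pyGet? seq1 i, PySem.Str.pyGet? seq2 i with
        | some c1, some c2 => g acc (c1, c2)
        | _, _ => acc) init
    = (seq1.toList.zip seq2.toList).foldl g init := by
  have hlen : (seq1.toList.zip seq2.toList).length = seq1.toList.length := by
    rw [List.length_zip]; omega
  have hstr : PySem.Str.len seq1 = (((seq1.toList.zip seq2.toList).length : Nat) : Int) := by
    simp [hlen, PySem.Str.len_eq]
  rw [hstr,
    ← PySem.List.foldl_pyRange_zero_pyGetD' (seq1.toList.zip seq2.toList) (' ', ' ') g init]
  apply PySem.List.foldl_congr_mem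
  intro acc i hi
  obtain ⟨h0, hlt⟩ := (PySem.List.mem_pyRange_one).mp hi
  have hlt1 : i.toNat < seq1.toList.length := by omega
  have hlt2 : i.toNat < seq2.toList.length := by omega
  have hltz : i.toNat < (seq1.toList.zip seq2.toList).length := by omega
  have h1 : PySem.Str.pyGet? seq1 i = some (seq1.toList[i.toNat]) := by
    simp [PySem.List.pyGet?_eq_some_getElem seq1.toList h0 (by omega)]
  have h2 : PySem.Str.pyGet? seq2 i = some (seq2.toList[i.toNat]) := by
    simp [PySem.List.pyGet?_eq_some_getElem seq2.toList h0 (by omega)]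
  have h3 : PySem.List.pyGetD (seq1.toList.zip seq2.toList) i (' ', ' ')
      = (seq1.toList[i.toNat], seq2.toList[i.toNat]) := by
    rw [PySem.List.pyGetD_of_nonneg _ _ h0, List.getD_eq_getElem _ _ hltz]
    simp [List.getElem_zip]
  rw [h1, h2, h3]

-- A's loop counts the four predicates
theorem pv_A_loop_gen (l : List (Char × Char)) :
    ∀ a b c d : Int, l.foldl pvStepA (a, b, c, d)
      = (a + (l.countP pvId : Int), b + (l.countP pvPur : Int),
         c + (l.countP pvPyr : Int), d + (l.countP pvTv : Int)) := by
  induction l with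
  | nil => intro a b c d; simp
  | cons x t ih =>
    intro a b c d
    simp only [List.foldl_cons, List.countP_cons]
    by_cases h1 : (x.1 == x.2) = true
    · simp only [pvStepA, pvId, pvPur, pvPyr, pvTv, h1, ih]
      simp
      all_goals omega
    · rw [Bool.not_eq_true] at h1
      by_cases h2 : ("AG".toList.contains x.1 && "AG".toList.contains x.2) = true
      · simp only [pvStepA, pvId, pvPur, pvPyr, pvTv, h1, h2, ih]
        simp
        all_goals omega
      · rw [Bool.not_eq_true] at h2
        by_cases h3 : ("CT".toList.contains x.1 && "CT".toList.contains x.2) = true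
        · simp only [pvStepA, pvId, pvPur, pvPyr, pvTv, h1, h2, h3, ih]
          simp
          all_goals omega
        · rw [Bool.not_eq_true] at h3
          simp only [pvStepA, pvId, pvPur, pvPyr, pvTv, h1, h2, h3, ih]
          simp
          all_goals omega

theorem pv_A_loop (l : List (Char × Char)) :
    l.foldl pvStepA (0, 0, 0, 0)
      = ((l.countP pvId : Int), (l.countP pvPur : Int), (l.countP pvPyr : Int), (l.countP pvTv : Int)) := by
  simp [pv_A_loop_gen]

-- a purine transition is exactly an (A,G) or (G,A) pair
theorem pvPur_eq (x : Char × Char) :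
    pvPur x = (x == ('A', 'G') || x == ('G', 'A')) := by
  obtain ⟨a, b⟩ := x
  have e : "AG".toList = ['A', 'G'] := by decide
  have hP : ((a, b) == ('A', 'G')) = (a == 'A' && b == 'G') := rfl
  have hQ : ((a, b) == ('G', 'A')) = (a == 'G' && b == 'A') := rfl
  simp only [pvPur, e, List.contains_cons, List.contains_nil, Bool.or_false, hP, hQ]
  cases hab : a == b <;> cases h1 : a == 'A' <;> cases h2 : a == 'G' <;>
    cases h3 : b == 'A' <;> cases h4 : b == 'G' <;> simp_all

-- a pyrimidine transition is exactly a (C,T) or (T,C) pair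
theorem pvPyr_eq (x : Char × Char) :
    pvPyr x = (x == ('C', 'T') || x == ('T', 'C')) := by
  obtain ⟨a, b⟩ := x
  have eAG : "AG".toList = ['A', 'G'] := by decide
  have eCT : "CT".toList = ['C', 'T'] := by decide
  have hP : ((a, b) == ('C', 'T')) = (a == 'C' && b == 'T') := rfl
  have hQ : ((a, b) == ('T', 'C')) = (a == 'T' && b == 'C') := rfl
  simp only [pvPyr, eAG, eCT, List.contains_cons, List.contains_nil, Bool.or_false, hP, hQ]
  cases hab : a == b <;> cases h1 : a == 'A' <;> cases h2 : a == 'G' <;>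
    cases h3 : b == 'A' <;> cases h4 : b == 'G' <;> cases h5 : a == 'C' <;>
      cases h6 : a == 'T' <;> cases h7 : b == 'C' <;> cases h8 : b == 'T' <;> simp_all

-- counting a disjunction of two distinct literals splits into two counts
theorem pv_countP_two {α : Type} [BEq α] [LawfulBEq α] (v w : α) (hvw : v ≠ w) (l : List α) :
    l.countP (fun x => x == v || x == w) = l.count v + l.count w := by
  induction l with
  | nil => simp
  | cons x t ih =>
    simp only [List.countP_cons, List.count_cons, ih]
    by_cases hv : x = v
    · subst hv; simp [beq_iff_eq, hvw]; omega
    · by_cases hw : x = w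
      · subst hw; simp [beq_iff_eq, hv]; omega
      · simp [beq_iff_eq, hv, hw]

-- every pair satisfies exactly one of the four predicates
theorem pv_point (x : Char × Char) :
    ((if pvId x then 1 else 0) + (if pvPur x then 1 else 0)
      + (if pvPyr x then 1 else 0) + (if pvTv x then 1 else 0) : Nat) = 1 := by
  unfold pvId pvPur pvPyr pvTv
  cases hb1 : (x.1 == x.2) <;>
    cases hb2 : ("AG".toList.contains x.1 && "AG".toList.contains x.2) <;>
      cases hb3 : ("CT".toList.contains x.1 && "CT".toList.contains x.2) <;> simp

-- the four predicates partition every pair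
theorem pv_partition (l : List (Char × Char)) :
    l.countP pvId + l.countP pvPur + l.countP pvPyr + l.countP pvTv = l.length := by
  induction l with
  | nil => simp
  | cons x t ih =>
    simp only [List.countP_cons, List.length_cons]
    have := pv_point x
    omega

-- same statement for the nested-match loop shape of port B
theorem pv_loop_zip' {σ : Type} (seq1 seq2 : String)
    (h : seq1.toList.length ≤ seq2.toList.length) (g : σ → Char × Char → σ) (init : σ) :
    (PySem.List.pyRange 0 (PySem.Str.len seq1) 1).foldl
      (fun acc i =>
        match PySem.Str.pyGet? seq1 i with
        | some c1 =>
          match PySem.Str.pyGet? seq2 i with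
          | some c2 => g acc (c1, c2)
          | none => acc
        | none => acc) init
    = (seq1.toList.zip seq2.toList).foldl g init := by
  rw [← pv_loop_zip seq1 seq2 h g init]
  apply PySem.List.foldl_congr_mem
  intro acc i _
  cases PySem.Str.pyGet? seq1 i <;> cases PySem.Str.pyGet? seq2 i <;> rfl

-- the comprehension loop materializes the zip
theorem pv_pairs_eq (seq1 seq2 : String) (h : seq1.toList.length ≤ seq2.toList.length) :
    (PySem.List.pyRange 0 (PySem.Str.len seq1) 1).foldl
      (fun (acc : List (Char × Char)) i =>
        match PySem.Str.pyGet? seq1 i with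
        | some c1 =>
          match PySem.Str.pyGet? seq2 i with
          | some c2 => acc ++ [(c1, c2)]
          | none => acc
        | none => acc) []
    = seq1.toList.zip seq2.toList := by
  rw [pv_loop_zip' seq1 seq2 h (fun acc x => acc ++ [x]) []]
  induction (seq1.toList.zip seq2.toList) using List.reverseRecOn with
  | nil => rfl
  | append_singleton t x ih => simp [ih]

-- ===== VERDICT (by name: the statement is the Claim_ definition above) =====
theorem calculation_set_b_spec : Claim_equal_calculation_set_b := by
  intro seq1 seq2 _hdom hpre
  unfold Spec_calculation_set_b calculation_set_b calculation_set_b_alt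
  dsimp only
  rw [pv_loop_zip seq1 seq2 hpre pvStepA (0, 0, 0, 0), pv_pairs_eq seq1 seq2 hpre, pv_A_loop]
  set l := seq1.toList.zip seq2.toList with hl
  have hid : l.foldl (fun (s : Int) p => if p.1 == p.2 then s + 1 else s) 0 = (l.countP pvId : Int) := by
    rw [PySem.List.foldl_if_add_one, zero_add]; rfl
  have hpur : (l.countP pvPur : Int)
      = (PySem.List.count l ('A', 'G') : Int) + (PySem.List.count l ('G', 'A') : Int) := by
    rw [List.countP_congr (fun x _ => by rw [pvPur_eq x]), pv_countP_two _ _ (by decide) l]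
    simp [PySem.List.count_eq]
  have hpyr : (l.countP pvPyr : Int)
      = (PySem.List.count l ('C', 'T') : Int) + (PySem.List.count l ('T', 'C') : Int) := by
    rw [List.countP_congr (fun x _ => by rw [pvPyr_eq x]), pv_countP_two _ _ (by decide) l]
    simp [PySem.List.count_eq]
  have hle : seq1.toList.length ≤ seq2.toList.length := hpre
  have hnum : PySem.Str.len seq1 = (l.length : Int) := by
    rw [PySem.Str.len_eq, hl, List.length_zip]
    congr 1
    omega
  have hpart := pv_partition l
  have htv : (l.countP pvTv : Int)
      = (l.length : Int) - (l.countP pvId : Int) - (l.countP pvPur : Int) - (l.countP pvPyr : Int) := by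
    omega
  rw [hnum, hid, ← hpur, ← hpyr, htv]
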